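-- pv_equiv track=rewrite | github.com/key-moon/golf | arc_dsl/dsl.py | gravitate
-- ===== SOURCE A (Python) =====
-- def height(piece):
--     if len(piece) == 0:
--         return 0
--     if isinstance(piece, tuple):
--         return len(piece)
--     return lowermost(piece) - uppermost(piece) + 1
--
-- def width(piece):
--     if len(piece) == 0:
--         return 0
--     if isinstance(piece, tuple):
--         return len(piece[0])
--     return rightmost(piece) - leftmost(piece) + 1
--
-- def toindices(patch):
--     if len(patch) == 0:
--         return frozenset()
--     if isinstance(next(iter(patch))[1], tuple):
--         return frozenset(index for value, index in patch)
--     return patch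
--
-- def shift(patch, directions):
--     if len(patch) == 0:
--         return patch
--     di, dj = directions
--     if isinstance(next(iter(patch))[1], tuple):
--         return frozenset((value, (i + di, j + dj)) for value, (i, j) in patch)
--     return frozenset((i + di, j + dj) for i, j in patch)
--
-- def uppermost(patch):
--     return min(i for i, j in toindices(patch))
--
-- def lowermost(patch):
--     return max(i for i, j in toindices(patch))
--
-- def leftmost(patch):
--     return min(j for i, j in toindices(patch))
--
-- def rightmost(patch):
--     return max(j for i, j in toindices(patch))
--
-- def vmatching(a, b):
--     return len(set(j for i, j in toindices(a)) & set(j for i, j in toindices(b))) > 0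
--
-- def manhattan(a, b):
--     return min(abs(ai - bi) + abs(aj - bj) for ai, aj in toindices(a) for bi, bj in toindices(b))
--
-- def adjacent(a, b):
--     return manhattan(a, b) == 1
--
-- def center(patch):
--     return (uppermost(patch) + height(patch) // 2, leftmost(patch) + width(patch) // 2)
--
-- def gravitate(source, destination):
--     si, sj = center(source)
--     di, dj = center(destination)
--     i, j = 0, 0
--     if vmatching(source, destination):
--         i = 1 if si < di else -1
--     else:
--         j = 1 if sj < dj else -1
--     gi, gj = i, j
--     c = 0
--     while not adjacent(source, destination) and c < 42:
--         c += 1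
--         gi += i
--         gj += j
--         source = shift(source, (i, j))
--     return (gi - i, gj - j)
-- ===== SOURCE B (Python) =====
-- def gravitate(source, destination):
--     # Closed-form step count instead of simulating up to 42 unit shifts of the point set.
--     sis = [i for i, _ in source]
--     sjs = [j for _, j in source]
--     dis = [i for i, _ in destination]
--     djs = [j for _, j in destination]
--     sci = min(sis) + (max(sis) - min(sis) + 1) // 2
--     scj = min(sjs) + (max(sjs) - min(sjs) + 1) // 2
--     dci = min(dis) + (max(dis) - min(dis) + 1) // 2
--     dcj = min(djs) + (max(djs) - min(djs) + 1) // 2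
--     vertical = any(aj == bj for aj in sjs for bj in djs)
--     if vertical:
--         s = 1 if sci < dci else -1
--         pairs = [(bi - ai, abs(bj - aj)) for ai, aj in source for bi, bj in destination]
--     else:
--         s = 1 if scj < dcj else -1
--         pairs = [(bj - aj, abs(bi - ai)) for ai, aj in source for bi, bj in destination]
--     # after t unit steps the pair (m, f) contributes distance |s*m - t| + f;
--     # adjacency at t means some pair contributes 1 and no pair contributes 0
--     zeros = set(s * m for m, f in pairs if f == 0)
--     cands = [t for m, f in pairs
--              for t in ([s * m] if f == 1 else [s * m - 1, s * m + 1] if f == 0 else [])]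
--     c = min([t for t in cands if 0 <= t < 42 and t not in zeros], default=42)
--     return (c * s, 0) if vertical else (0, c * s)
-- ===== Notes on version B (the rewrite author's own statement) =====
-- stated objective: alternative
-- what changed: B replaces A's simulation loop (up to 42 unit shifts of the whole point set, rebuilding the shifted frozenset and re-scanning all source-destination pairs for the Manhattan minimum at every step) by a closed-form computation: each pair yields at most two candidate step counts at which it sits at distance 1 and at most one forbidden count at which it overlaps, and the answer is the minimum admissible candidate (default 42); it trades the 42-step scan for one pass over the pairs, at the same asymptotic cost.
import Mathlib
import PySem

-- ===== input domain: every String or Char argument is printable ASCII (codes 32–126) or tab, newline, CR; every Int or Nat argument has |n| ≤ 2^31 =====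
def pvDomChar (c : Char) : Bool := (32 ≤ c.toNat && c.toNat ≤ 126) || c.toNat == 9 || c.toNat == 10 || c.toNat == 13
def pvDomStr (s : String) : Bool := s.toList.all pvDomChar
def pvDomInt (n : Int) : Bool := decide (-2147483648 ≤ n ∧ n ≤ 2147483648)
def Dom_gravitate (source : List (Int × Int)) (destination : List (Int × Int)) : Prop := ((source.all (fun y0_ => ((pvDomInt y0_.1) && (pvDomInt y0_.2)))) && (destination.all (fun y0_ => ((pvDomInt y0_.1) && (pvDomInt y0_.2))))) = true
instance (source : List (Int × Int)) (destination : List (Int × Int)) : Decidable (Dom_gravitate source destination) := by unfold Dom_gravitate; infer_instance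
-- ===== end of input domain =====

-- B replaces A's step-by-step gravity simulation (up to 42 set shifts, re-scanning all point
-- pairs each step) by a closed-form per-pair candidate computation of the first adjacency step.


-- shared primitive: Python's min/max of a nonempty int list (raises ValueError on [], excluded by Pre_)
def pyMinD (l : List Int) : Int := (PySem.List.min? l (fun x => x)).getD 0
def pyMaxD (l : List Int) : Int := (PySem.List.max? l (fun x => x)).getD 0

-- ===== PORT A =====
-- patches here are always index collections, so toindices(patch) = patch
def uppermostA (p : List (Int × Int)) : Int := pyMinD (p.map Prod.fst)
def lowermostA (p : List (Int × Int)) : Int := pyMaxD (p.map Prod.fst)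
def leftmostA (p : List (Int × Int)) : Int := pyMinD (p.map Prod.snd)
def rightmostA (p : List (Int × Int)) : Int := pyMaxD (p.map Prod.snd)
def heightA (p : List (Int × Int)) : Int := if p = [] then 0 else lowermostA p - uppermostA p + 1
def widthA (p : List (Int × Int)) : Int := if p = [] then 0 else rightmostA p - leftmostA p + 1
def centerA (p : List (Int × Int)) : Int × Int :=
  (uppermostA p + PySem.Int.floordiv (heightA p) 2, leftmostA p + PySem.Int.floordiv (widthA p) 2)
def vmatchingA (a b : List (Int × Int)) : Bool :=
  decide (0 < PySem.Set.len (PySem.Set.inter (PySem.Set.ofList (a.map Prod.snd)) (PySem.Set.ofList (b.map Prod.snd))))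
def shiftA (p : List (Int × Int)) (d : Int × Int) : List (Int × Int) :=
  if p = [] then p else PySem.Set.ofList (p.map (fun q => (q.1 + d.1, q.2 + d.2)))
def manhattanA (a b : List (Int × Int)) : Int :=
  pyMinD (a.flatMap (fun p => b.map (fun q => |p.1 - q.1| + |p.2 - q.2|)))
def adjacentA (a b : List (Int × Int)) : Bool := manhattanA a b == 1

-- the while loop: fuel = 42 - c, so 'c < 42' is 'fuel ≠ 0'
def gravLoopA (dest : List (Int × Int)) (i j : Int) :
    Nat → List (Int × Int) → Int → Int → Int × Int
  | fuel, src, gi, gj =>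
    if adjacentA src dest then (gi - i, gj - j)
    else
      match fuel with
      | 0 => (gi - i, gj - j)
      | f + 1 => gravLoopA dest i j f (shiftA src (i, j)) (gi + i) (gj + j)

def gravitate (source : List (Int × Int)) (destination : List (Int × Int)) : Int × Int :=
  let si := (centerA source).1
  let sj := (centerA source).2
  let di := (centerA destination).1
  let dj := (centerA destination).2
  let ij : Int × Int :=
    if vmatchingA source destination then (if si < di then 1 else -1, 0)
    else (0, if sj < dj then 1 else -1)
  gravLoopA destination ij.1 ij.2 42 source ij.1 ij.2

-- ===== PORT B =====
def gravitate_alt (source : List (Int × Int)) (destination : List (Int × Int)) : Int × Int :=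
  let sis := source.map Prod.fst
  let sjs := source.map Prod.snd
  let dis := destination.map Prod.fst
  let djs := destination.map Prod.snd
  let sci := pyMinD sis + PySem.Int.floordiv (pyMaxD sis - pyMinD sis + 1) 2
  let scj := pyMinD sjs + PySem.Int.floordiv (pyMaxD sjs - pyMinD sjs + 1) 2
  let dci := pyMinD dis + PySem.Int.floordiv (pyMaxD dis - pyMinD dis + 1) 2
  let dcj := pyMinD djs + PySem.Int.floordiv (pyMaxD djs - pyMinD djs + 1) 2
  let vertical := sjs.any (fun aj => djs.any (fun bj => aj == bj))
  let s : Int := if vertical then (if sci < dci then 1 else -1) else (if scj < dcj then 1 else -1)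
  let pairs : List (Int × Int) :=
    if vertical then source.flatMap (fun a => destination.map (fun b => (b.1 - a.1, |b.2 - a.2|)))
    else source.flatMap (fun a => destination.map (fun b => (b.2 - a.2, |b.1 - a.1|)))
  let zeros : PySem.Set Int :=
    PySem.Set.ofList ((pairs.filter (fun p => p.2 == 0)).map (fun p => s * p.1))
  let cands : List Int :=
    pairs.flatMap (fun p =>
      if p.2 == 1 then [s * p.1]
      else if p.2 == 0 then [s * p.1 - 1, s * p.1 + 1] else [])
  let c : Int :=
    (PySem.List.min? (cands.filter (fun t => decide (0 ≤ t) && decide (t < 42) && !(PySem.Set.contains zeros t))) (fun x => x)).getD 42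
  if vertical then (c * s, 0) else (0, c * s)

-- ===== PRECONDITION & SPEC =====
-- Python A raises ValueError (min of an empty sequence, via center) iff source or destination is empty.
def Pre_gravitate (source : List (Int × Int)) (destination : List (Int × Int)) : Prop :=
  source ≠ [] ∧ destination ≠ []
instance (source : List (Int × Int)) (destination : List (Int × Int)) : Decidable (Pre_gravitate source destination) := by unfold Pre_gravitate; infer_instance

def pvWitness_gravitate : (List (Int × Int)) × (List (Int × Int)) := ([(0, 0)], [(3, 0)])

def Spec_gravitate (source : List (Int × Int)) (destination : List (Int × Int)) (out : Int × Int) : Prop := out = gravitate_alt source destination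
instance (source : List (Int × Int)) (destination : List (Int × Int)) (out : Int × Int) : Decidable (Spec_gravitate source destination out) := by unfold Spec_gravitate; infer_instance

-- ===== CLAIM (what is proved, stated in full; the proofs are below) =====
def Claim_equal_gravitate : Prop := ∀ (source : List (Int × Int)) (destination : List (Int × Int)), Dom_gravitate source destination → Pre_gravitate source destination → Spec_gravitate source destination (gravitate source destination)

-- ===== LEMMAS AND PROOFS =====

-- proof-side abbreviations
def pvPairs (g : Int × Int → Int × Int → Int × Int) (src dst : List (Int × Int)) : List (Int × Int) :=
  src.flatMap (fun a => dst.map (g a))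

-- the min pair distance after t unit steps of sign s along the moving axis
def pvDQ (s : Int) (pairs : List (Int × Int)) (t : Int) : Int :=
  pyMinD (pairs.map (fun p => |s * p.1 - t| + p.2))

def pvCB (s : Int) (pairs : List (Int × Int)) : Int :=
  let zeros : PySem.Set Int :=
    PySem.Set.ofList ((pairs.filter (fun p => p.2 == 0)).map (fun p => s * p.1))
  let cands : List Int :=
    pairs.flatMap (fun p =>
      if p.2 == 1 then [s * p.1]
      else if p.2 == 0 then [s * p.1 - 1, s * p.1 + 1] else [])
  (PySem.List.min? (cands.filter (fun t => decide (0 ≤ t) && decide (t < 42) && !(PySem.Set.contains zeros t))) (fun x => x)).getD 42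

-- number of loop iterations A performs, starting at counter c with fuel steps left
def stepsF (p : Nat → Bool) : Nat → Nat → Nat
  | _, 0 => 0
  | c, f + 1 => if p c then 0 else stepsF p (c + 1) f + 1

lemma pyMinD_spec (l : List Int) (h : l ≠ []) : pyMinD l ∈ l ∧ ∀ x ∈ l, pyMinD l ≤ x := by
  unfold pyMinD
  cases hm : PySem.List.min? l (fun x => x) with
  | none => exact absurd ((PySem.List.min?_eq_none_iff l _).1 hm) h
  | some m =>
    refine ⟨by simpa using PySem.List.min?_mem hm, fun x hx => ?_⟩
    simpa using PySem.List.min?_isMin hm x hx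

lemma pyMinD_congr (l l' : List Int) (h : l ≠ []) (h' : l' ≠ [])
    (hmem : ∀ x, x ∈ l ↔ x ∈ l') : pyMinD l = pyMinD l' := by
  obtain ⟨m1, lb1⟩ := pyMinD_spec l h
  obtain ⟨m2, lb2⟩ := pyMinD_spec l' h'
  exact le_antisymm (lb1 _ ((hmem _).2 m2)) (lb2 _ ((hmem _).1 m1))

lemma pyMinD_eq_one_iff (l : List Int) (h : l ≠ []) (hnn : ∀ x ∈ l, 0 ≤ x) :
    pyMinD l = 1 ↔ (1 ∈ l ∧ ∀ x ∈ l, x ≠ 0) := by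
  obtain ⟨hm, hlb⟩ := pyMinD_spec l h
  constructor
  · intro he
    refine ⟨he ▸ hm, fun x hx hx0 => ?_⟩
    have := hlb x hx; omega
  · rintro ⟨h1, h0⟩
    have hle := hlb 1 h1
    have h0' := h0 _ hm
    have hge := hnn _ hm
    omega

lemma abs_add_eq_one (u f : Int) (hf : 0 ≤ f) :
    |u| + f = 1 ↔ (f = 1 ∧ u = 0) ∨ (f = 0 ∧ (u = 1 ∨ u = -1)) := by
  rcases abs_cases u with ⟨h1, h2⟩ | ⟨h1, h2⟩ <;> rw [h1] <;> omega

lemma abs_add_eq_zero (u f : Int) (hf : 0 ≤ f) : |u| + f = 0 ↔ (u = 0 ∧ f = 0) := by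
  rcases abs_cases u with ⟨h1, h2⟩ | ⟨h1, h2⟩ <;> rw [h1] <;> omega

lemma mem_shiftA (src : List (Int × Int)) (hne : src ≠ []) (d : Int × Int) (x : Int × Int) :
    x ∈ shiftA src d ↔ ∃ q ∈ src, x = (q.1 + d.1, q.2 + d.2) := by
  unfold shiftA
  rw [if_neg hne]
  simp only [PySem.Set.mem_ofList, List.mem_map]
  constructor
  · rintro ⟨q, hq, rfl⟩; exact ⟨q, hq, rfl⟩
  · rintro ⟨q, hq, rfl⟩; exact ⟨q, hq, rfl⟩

lemma stepsF_le (p : Nat → Bool) : ∀ (fuel c : Nat), stepsF p c fuel ≤ fuel := by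
  intro fuel
  induction fuel with
  | zero => intro c; simp [stepsF]
  | succ f ih =>
    intro c
    simp only [stepsF]
    split
    · omega
    · have := ih (c + 1); omega

lemma stepsF_spec (p : Nat → Bool) : ∀ (fuel c : Nat),
    (∀ t, t < stepsF p c fuel → p (c + t) = false) ∧
    (stepsF p c fuel < fuel → p (c + stepsF p c fuel) = true) := by
  intro fuel
  induction fuel with
  | zero => intro c; simp [stepsF]
  | succ f ih =>
    intro c
    obtain ⟨ih1, ih2⟩ := ih (c + 1)
    simp only [stepsF]
    split
    · rename_i hpc
      exact ⟨fun t ht => absurd ht (by omega), fun _ => by simpa using hpc⟩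
    · rename_i hpc
      constructor
      · intro t ht
        cases t with
        | zero => simpa using eq_false_of_ne_true hpc
        | succ t' =>
          have := ih1 t' (by omega)
          simpa [Nat.add_comm, Nat.add_left_comm, Nat.add_assoc] using this
      · intro hlt
        have := ih2 (by omega)
        have harr : c + (stepsF p (c + 1) f + 1) = c + 1 + stepsF p (c + 1) f := by omega
        rw [harr]; exact this

lemma gravLoopA_spec (dest : List (Int × Int)) (i0 j0 : Int) (p : Nat → Bool)
    (source : List (Int × Int)) (hsrc : source ≠ [])
    (hadj : ∀ (src : List (Int × Int)) (c : Nat),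
      (∀ x, x ∈ src ↔ ∃ a ∈ source, x = (a.1 + (c : Int) * i0, a.2 + (c : Int) * j0)) →
      adjacentA src dest = p c) :
    ∀ (fuel c : Nat) (src : List (Int × Int)) (gi gj : Int),
      (∀ x, x ∈ src ↔ ∃ a ∈ source, x = (a.1 + (c : Int) * i0, a.2 + (c : Int) * j0)) →
      gravLoopA dest i0 j0 fuel src gi gj
        = (gi + (stepsF p c fuel : Int) * i0 - i0, gj + (stepsF p c fuel : Int) * j0 - j0) := by
  intro fuel
  induction fuel with
  | zero =>
    intro c src gi gj hmem
    simp only [gravLoopA, stepsF]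
    split <;> simp
  | succ f ih =>
    intro c src gi gj hmem
    have hA := hadj src c hmem
    rw [gravLoopA]
    by_cases hp : p c = true
    · rw [hA, hp]
      rw [if_pos rfl]
      simp only [stepsF, hp, if_pos]
      simp
    · have hp' : p c = false := by simpa using hp
      rw [hA, hp']
      rw [if_neg (by simp)]
      have hsne : src ≠ [] := by
        obtain ⟨a, tl, rfl⟩ := List.exists_cons_of_ne_nil hsrc
        have : ((a.1 + (c : Int) * i0, a.2 + (c : Int) * j0) : Int × Int) ∈ src :=
          (hmem _).2 ⟨a, by simp, rfl⟩
        exact List.ne_nil_of_mem this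
      have hmem' : ∀ x, x ∈ shiftA src (i0, j0) ↔
          ∃ a ∈ source, x = (a.1 + ((c + 1 : Nat) : Int) * i0, a.2 + ((c + 1 : Nat) : Int) * j0) := by
        intro x
        rw [mem_shiftA src hsne]
        constructor
        · rintro ⟨q, hq, rfl⟩
          obtain ⟨a, ha, rfl⟩ := (hmem q).1 hq
          exact ⟨a, ha, by push_cast; ring_nf⟩
        · rintro ⟨a, ha, rfl⟩
          refine ⟨(a.1 + (c : Int) * i0, a.2 + (c : Int) * j0), (hmem _).2 ⟨a, ha, rfl⟩, ?_⟩
          push_cast; ring_nf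
      rw [ih (c + 1) _ (gi + i0) (gj + j0) hmem']
      simp only [stepsF, hp', Bool.false_eq_true, ite_false]
      push_cast; simp only [Prod.mk.injEq]; constructor <;> ring

lemma manhattanA_shift (source dest : List (Int × Int)) (hsrc : source ≠ []) (hdst : dest ≠ [])
    (i0 j0 s : Int) (g : Int × Int → Int × Int → Int × Int)
    (hgv : ∀ a b (c : Int), |s * (g a b).1 - c| + (g a b).2
        = |a.1 + c * i0 - b.1| + |a.2 + c * j0 - b.2|)
    (c : Int) (src : List (Int × Int))
    (hmem : ∀ x, x ∈ src ↔ ∃ a ∈ source, x = (a.1 + c * i0, a.2 + c * j0)) :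
    manhattanA src dest = pvDQ s (pvPairs g source dest) c := by
  obtain ⟨a0, stl, hseq⟩ := List.exists_cons_of_ne_nil hsrc
  obtain ⟨b0, dtl, hdeq⟩ := List.exists_cons_of_ne_nil hdst
  have ha0 : a0 ∈ source := by rw [hseq]; simp
  have hb0 : b0 ∈ dest := by rw [hdeq]; simp
  have hq0 : ((a0.1 + c * i0, a0.2 + c * j0) : Int × Int) ∈ src := (hmem _).2 ⟨a0, ha0, rfl⟩
  unfold manhattanA pvDQ
  apply pyMinD_congr
  · exact List.ne_nil_of_mem (List.mem_flatMap.2 ⟨_, hq0, List.mem_map.2 ⟨b0, hb0, rfl⟩⟩)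
  · exact List.ne_nil_of_mem (List.mem_map.2 ⟨g a0 b0,
      List.mem_flatMap.2 ⟨a0, ha0, List.mem_map.2 ⟨b0, hb0, rfl⟩⟩, rfl⟩)
  · intro x
    simp only [List.mem_flatMap, List.mem_map, pvPairs]
    constructor
    · rintro ⟨q, hq, b, hb, rfl⟩
      obtain ⟨a, ha, rfl⟩ := (hmem q).1 hq
      exact ⟨g a b, ⟨a, ha, b, hb, rfl⟩, hgv a b c⟩
    · rintro ⟨q, ⟨a, ha, b, hb, rfl⟩, rfl⟩
      exact ⟨(a.1 + c * i0, a.2 + c * j0), (hmem _).2 ⟨a, ha, rfl⟩, b, hb, (hgv a b c).symm⟩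

lemma pvCB_spec (s : Int) (pairs : List (Int × Int)) (hp : pairs ≠ [])
    (hnn : ∀ p ∈ pairs, 0 ≤ p.2) :
    0 ≤ pvCB s pairs ∧ pvCB s pairs ≤ 42 ∧
      (pvCB s pairs < 42 → pvDQ s pairs (pvCB s pairs) = 1) ∧
      (∀ t : Int, 0 ≤ t → t < pvCB s pairs → pvDQ s pairs t ≠ 1) := by
  have hmapne : pairs.map (fun p => fun t : Int => |s * p.1 - t| + p.2) ≠ [] := by
    simpa using hp
  have hDQ : ∀ t : Int, pvDQ s pairs t = 1 ↔
      ((∃ q ∈ pairs, |s * q.1 - t| + q.2 = 1) ∧ ∀ q ∈ pairs, |s * q.1 - t| + q.2 ≠ 0) := by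
    intro t
    unfold pvDQ
    rw [pyMinD_eq_one_iff]
    · simp only [List.mem_map]
      constructor
      · rintro ⟨⟨q, hq, hq1⟩, h0⟩
        exact ⟨⟨q, hq, hq1⟩, fun q hq => h0 _ ⟨q, hq, rfl⟩⟩
      · rintro ⟨⟨q, hq, hq1⟩, h0⟩
        exact ⟨⟨q, hq, hq1⟩, by rintro x ⟨q, hq, rfl⟩; exact h0 q hq⟩
    · simpa using hp
    · rintro x hx
      simp only [List.mem_map] at hx
      obtain ⟨q, hq, rfl⟩ := hx
      have := hnn q hq
      have := abs_nonneg (s * q.1 - t)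
      omega
  have hcand : ∀ t : Int,
      (t ∈ pairs.flatMap (fun p =>
        if p.2 == 1 then [s * p.1]
        else if p.2 == 0 then [s * p.1 - 1, s * p.1 + 1] else [])) ↔
      ∃ q ∈ pairs, |s * q.1 - t| + q.2 = 1 := by
    intro t
    simp only [List.mem_flatMap]
    constructor
    · rintro ⟨q, hq, ht⟩
      refine ⟨q, hq, ?_⟩
      rw [abs_add_eq_one _ _ (hnn q hq)]
      by_cases h1 : q.2 = 1
      · simp [h1] at ht; left; exact ⟨h1, by omega⟩
      · by_cases h0 : q.2 = 0
        · simp [h0] at ht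
          right; exact ⟨h0, by omega⟩
        · simp [h1, h0] at ht
    · rintro ⟨q, hq, ht⟩
      rw [abs_add_eq_one _ _ (hnn q hq)] at ht
      refine ⟨q, hq, ?_⟩
      rcases ht with ⟨h1, hu⟩ | ⟨h0, hu⟩
      · simp [h1]; omega
      · have h1 : q.2 ≠ 1 := by omega
        simp [h0]; omega
  have hzero : ∀ t : Int,
      (t ∈ PySem.Set.ofList
        ((pairs.filter (fun p => p.2 == 0)).map (fun p => s * p.1))) ↔
      ∃ q ∈ pairs, |s * q.1 - t| + q.2 = 0 := by
    intro t
    rw [PySem.Set.mem_ofList]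
    simp only [List.mem_map, List.mem_filter, beq_iff_eq]
    constructor
    · rintro ⟨q, ⟨hq, hq0⟩, rfl⟩
      exact ⟨q, hq, by rw [abs_add_eq_zero _ _ (hnn q hq)]; omega⟩
    · rintro ⟨q, hq, hq0⟩
      rw [abs_add_eq_zero _ _ (hnn q hq)] at hq0
      exact ⟨q, ⟨hq, by omega⟩, by omega⟩
  set zeros : PySem.Set Int :=
    PySem.Set.ofList ((pairs.filter (fun p => p.2 == 0)).map (fun p => s * p.1)) with hzdef
  set cands : List Int :=
    pairs.flatMap (fun p =>
      if p.2 == 1 then [s * p.1]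
      else if p.2 == 0 then [s * p.1 - 1, s * p.1 + 1] else []) with hcdef
  set filtered : List Int :=
    cands.filter (fun t => decide (0 ≤ t) && decide (t < 42) && !(PySem.Set.contains zeros t)) with hfdef
  have hcb : pvCB s pairs = (PySem.List.min? filtered (fun x => x)).getD 42 := rfl
  rw [hcb]
  have hfil : ∀ t : Int, t ∈ filtered ↔ (0 ≤ t ∧ t < 42 ∧ pvDQ s pairs t = 1) := by
    intro t
    rw [hfdef, List.mem_filter]
    simp only [Bool.and_eq_true, decide_eq_true_eq, Bool.not_eq_true',
      PySem.Set.contains]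
    rw [hDQ t]
    constructor
    · rintro ⟨hc, ⟨h0, h42⟩, hnz⟩
      refine ⟨h0, h42, (hcand t).1 hc, fun q hq h => ?_⟩
      have hzt : t ∈ zeros := (hzero t).2 ⟨q, hq, h⟩
      have hct : List.contains zeros t = true := by
        rw [List.contains_iff_exists_mem_beq]
        exact ⟨t, hzt, by simp⟩
      rw [hct] at hnz
      exact absurd hnz (by simp)
    · rintro ⟨h0, h42, he, hz⟩
      refine ⟨(hcand t).2 he, ⟨h0, h42⟩, ?_⟩
      rw [← Bool.not_eq_true, List.contains_iff_exists_mem_beq]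
      rintro ⟨x, hx, hbeq⟩
      have hxt : t = x := by simpa using hbeq
      subst hxt
      obtain ⟨q, hq, h⟩ := (hzero t).1 hx
      exact hz q hq h
  cases hm : PySem.List.min? filtered (fun x => x) with
  | none =>
    have hfe : filtered = [] := (PySem.List.min?_eq_none_iff filtered _).1 hm
    simp only [Option.getD_none]
    refine ⟨by norm_num, by norm_num, by norm_num, fun t h0 hlt hdq => ?_⟩
    have : t ∈ filtered := (hfil t).2 ⟨h0, by omega, hdq⟩
    simp [hfe] at this
  | some m =>
    simp only [Option.getD_some]
    have hmm := PySem.List.min?_mem hm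
    obtain ⟨h0, h42, hdq⟩ := (hfil m).1 hmm
    refine ⟨h0, by omega, fun _ => hdq, ?_⟩
    intro t ht0 htm hdqt
    have htf : t ∈ filtered := (hfil t).2 ⟨ht0, by omega, hdqt⟩
    have := PySem.List.min?_isMin hm t htf
    simp at this
    omega

lemma pvMaster (source dest : List (Int × Int)) (hsrc : source ≠ []) (hdst : dest ≠ [])
    (i0 j0 s : Int) (g : Int × Int → Int × Int → Int × Int)
    (hg0 : ∀ a b, 0 ≤ (g a b).2)
    (hgv : ∀ a b (c : Int), |s * (g a b).1 - c| + (g a b).2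
        = |a.1 + c * i0 - b.1| + |a.2 + c * j0 - b.2|) :
    gravLoopA dest i0 j0 42 source i0 j0
      = (pvCB s (pvPairs g source dest) * i0, pvCB s (pvPairs g source dest) * j0) := by
  obtain ⟨a0, stl, hseq⟩ := List.exists_cons_of_ne_nil hsrc
  obtain ⟨b0, dtl, hdeq⟩ := List.exists_cons_of_ne_nil hdst
  have ha0 : a0 ∈ source := by rw [hseq]; simp
  have hb0 : b0 ∈ dest := by rw [hdeq]; simp
  set pairs := pvPairs g source dest with hpdef
  have hpne : pairs ≠ [] := by
    apply List.ne_nil_of_mem (a := g a0 b0)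
    rw [hpdef]
    exact List.mem_flatMap.2 ⟨a0, ha0, List.mem_map.2 ⟨b0, hb0, rfl⟩⟩
  have hnn : ∀ p ∈ pairs, 0 ≤ p.2 := by
    intro p hp
    rw [hpdef] at hp
    obtain ⟨a, _, hb⟩ := List.mem_flatMap.1 hp
    obtain ⟨b, _, rfl⟩ := List.mem_map.1 hb
    exact hg0 a b
  set p : Nat → Bool := fun c => decide (pvDQ s pairs (c : Int) = 1) with hpfun
  have hadj : ∀ (src : List (Int × Int)) (c : Nat),
      (∀ x, x ∈ src ↔ ∃ a ∈ source, x = (a.1 + (c : Int) * i0, a.2 + (c : Int) * j0)) →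
      adjacentA src dest = p c := by
    intro src c hmem
    unfold adjacentA
    rw [manhattanA_shift source dest hsrc hdst i0 j0 s g hgv (c : Int) src hmem]
    rw [hpfun, ← hpdef, Bool.eq_iff_iff]
    simp
  have hmem0 : ∀ x : Int × Int, x ∈ source ↔
      ∃ a ∈ source, x = (a.1 + ((0 : Nat) : Int) * i0, a.2 + ((0 : Nat) : Int) * j0) := by
    intro x
    constructor
    · intro hx; exact ⟨x, hx, by simp⟩
    · rintro ⟨a, ha, rfl⟩; simpa using ha
  have hloop := gravLoopA_spec dest i0 j0 p source hsrc hadj 42 0 source i0 j0 hmem0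
  rw [hloop]
  set k : Nat := stepsF p 0 42 with hkdef
  have hkle : k ≤ 42 := stepsF_le p 42 0
  obtain ⟨hkf, hkt⟩ := stepsF_spec p 42 0
  obtain ⟨hc0, hc42, hceq, hclt⟩ := pvCB_spec s pairs hpne hnn
  have hkcb : (k : Int) = pvCB s pairs := by
    rcases lt_trichotomy ((k : Int)) (pvCB s pairs) with hlt | heq | hgt
    · exfalso
      have hk42 : k < 42 := by omega
      have hpk : p k = true := by simpa [hkdef] using hkt hk42
      have hdq : pvDQ s pairs (k : Int) = 1 := by
        rw [hpfun] at hpk; simpa using hpk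
      exact hclt (k : Int) (by positivity) hlt hdq
    · exact heq
    · exfalso
      have hcb42 : pvCB s pairs < 42 := by
        have : (k : Int) ≤ 42 := by exact_mod_cast hkle
        omega
      have hdq : pvDQ s pairs (pvCB s pairs) = 1 := hceq hcb42
      set t : Nat := (pvCB s pairs).toNat with htdef
      have htc : (t : Int) = pvCB s pairs := Int.toNat_of_nonneg hc0
      have htk : t < k := by omega
      have hpt : p (0 + t) = false := hkf t (by simpa [hkdef] using htk)
      rw [hpfun] at hpt
      simp only [Nat.zero_add, decide_eq_false_iff_not] at hpt
      rw [htc] at hpt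
      exact hpt hdq
  rw [← hkcb]
  simp only [Prod.mk.injEq]
  constructor <;> ring

lemma vmatchingA_eq_any (a b : List (Int × Int)) :
    vmatchingA a b
      = (a.map Prod.snd).any (fun aj => (b.map Prod.snd).any (fun bj => aj == bj)) := by
  unfold vmatchingA
  rw [Bool.eq_iff_iff]
  simp only [decide_eq_true_eq, List.any_eq_true, beq_iff_eq, PySem.Set.len, PySem.Set.inter]
  rw [Int.natCast_pos, List.length_pos_iff_exists_mem]
  constructor
  · rintro ⟨x, hx⟩
    rw [List.mem_filter] at hx
    obtain ⟨hxa, hxb⟩ := hx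
    rw [PySem.Set.mem_ofList] at hxa
    have hxb' : x ∈ PySem.Set.ofList (b.map Prod.snd) := by
      have := hxb
      simpa [PySem.Set.contains, List.contains_iff_exists_mem_beq] using this
    rw [PySem.Set.mem_ofList] at hxb'
    exact ⟨x, hxa, x, hxb', rfl⟩
  · rintro ⟨x, hxa, y, hyb, rfl⟩
    refine ⟨x, ?_⟩
    rw [List.mem_filter]
    refine ⟨(PySem.Set.mem_ofList _ _).2 hxa, ?_⟩
    simp only [PySem.Set.contains, List.contains_iff_exists_mem_beq]
    exact ⟨x, (PySem.Set.mem_ofList _ _).2 hyb, by simp⟩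

lemma centerA_fst (p : List (Int × Int)) (h : p ≠ []) :
    (centerA p).1 = pyMinD (p.map Prod.fst)
      + PySem.Int.floordiv (pyMaxD (p.map Prod.fst) - pyMinD (p.map Prod.fst) + 1) 2 := by
  simp [centerA, heightA, uppermostA, lowermostA, if_neg h]

lemma centerA_snd (p : List (Int × Int)) (h : p ≠ []) :
    (centerA p).2 = pyMinD (p.map Prod.snd)
      + PySem.Int.floordiv (pyMaxD (p.map Prod.snd) - pyMinD (p.map Prod.snd) + 1) 2 := by
  simp [centerA, widthA, leftmostA, rightmostA, if_neg h]

-- ===== VERDICT (by name: the statement is the Claim_ definition above) =====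
theorem gravitate_spec : Claim_equal_gravitate := by
  intro source destination hdom hpre
  obtain ⟨hs, hd⟩ := hpre
  unfold Spec_gravitate
  simp only [gravitate, gravitate_alt, vmatchingA_eq_any, centerA_fst source hs,
    centerA_fst destination hd, centerA_snd source hs, centerA_snd destination hd]
  cases hv : (List.map Prod.snd source).any (fun aj => (List.map Prod.snd destination).any fun bj => aj == bj) with
  | true =>
    simp only [if_true]
    set s : Int := if pyMinD (List.map Prod.fst source) + PySem.Int.floordiv (pyMaxD (List.map Prod.fst source) - pyMinD (List.map Prod.fst source) + 1) 2 < pyMinD (List.map Prod.fst destination) + PySem.Int.floordiv (pyMaxD (List.map Prod.fst destination) - pyMinD (List.map Prod.fst destination) + 1) 2 then (1 : Int) else -1 with hsdef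
    have hsor : s = 1 ∨ s = -1 := by rw [hsdef]; split <;> simp
    have hgv : ∀ (a b : Int × Int) (c : Int), |s * (b.1 - a.1) - c| + |b.2 - a.2|
        = |a.1 + c * s - b.1| + |a.2 + c * 0 - b.2| := by
      intro a b c
      rcases hsor with h | h <;> rw [h]
      · have h1 : a.1 + c * 1 - b.1 = -(1 * (b.1 - a.1) - c) := by ring
        have h2 : a.2 + c * 0 - b.2 = -(b.2 - a.2) := by ring
        rw [h1, h2, abs_neg, abs_neg]
      · have h1 : a.1 + c * (-1) - b.1 = (-1) * (b.1 - a.1) - c := by ring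
        have h2 : a.2 + c * 0 - b.2 = -(b.2 - a.2) := by ring
        rw [h1, h2, abs_neg]
    rw [pvMaster source destination hs hd s 0 s (fun a b => (b.1 - a.1, |b.2 - a.2|))
      (fun a b => abs_nonneg _) hgv]
    simp only [pvCB, pvPairs, mul_zero]
  | false =>
    simp only [Bool.false_eq_true, if_false]
    set s : Int := if pyMinD (List.map Prod.snd source) + PySem.Int.floordiv (pyMaxD (List.map Prod.snd source) - pyMinD (List.map Prod.snd source) + 1) 2 < pyMinD (List.map Prod.snd destination) + PySem.Int.floordiv (pyMaxD (List.map Prod.snd destination) - pyMinD (List.map Prod.snd destination) + 1) 2 then (1 : Int) else -1 with hsdef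
    have hsor : s = 1 ∨ s = -1 := by rw [hsdef]; split <;> simp
    have hgv : ∀ (a b : Int × Int) (c : Int), |s * (b.2 - a.2) - c| + |b.1 - a.1|
        = |a.1 + c * 0 - b.1| + |a.2 + c * s - b.2| := by
      intro a b c
      rcases hsor with h | h <;> rw [h]
      · have h1 : a.2 + c * 1 - b.2 = -(1 * (b.2 - a.2) - c) := by ring
        have h2 : a.1 + c * 0 - b.1 = -(b.1 - a.1) := by ring
        rw [h1, h2, abs_neg, abs_neg, add_comm]
      · have h1 : a.2 + c * (-1) - b.2 = (-1) * (b.2 - a.2) - c := by ring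
        have h2 : a.1 + c * 0 - b.1 = -(b.1 - a.1) := by ring
        rw [h1, h2, abs_neg, add_comm]
    rw [pvMaster source destination hs hd 0 s s (fun a b => (b.2 - a.2, |b.1 - a.1|))
      (fun a b => abs_nonneg _) hgv]
    simp only [pvCB, pvPairs, mul_zero]
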